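-- pv_equiv track=rewrite | github.com/justjaaara/semestre_iv | analisis_algoritmos/taller y exposicion/algoritmo2.py | asignacion_aproximada
-- ===== SOURCE A (Python) =====
-- def asignacion_aproximada(costos):
--     n = len(costos)  # número de trabajadores y tareas
--     tareas_asignadas = [False] * n  # Para rastrear qué tareas ya han sido asignadas
--     trabajadores_asignados = [-1] * n  # Asignación de tareas a trabajadores
--
--     for i in range(n):
--         # Para cada trabajador, asignamos la tarea de menor costo disponible
--         min_costo = float('inf')
--         tarea_elegida = -1
--
--         for j in range(n):
--             if not tareas_asignadas[j] and costos[i][j] < min_costo: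
--                 min_costo = costos[i][j]
--                 tarea_elegida = j
--
--         # Asignamos la tarea elegida al trabajador actual
--         trabajadores_asignados[i] = tarea_elegida
--         tareas_asignadas[tarea_elegida] = True
--
--     return trabajadores_asignados
-- ===== SOURCE B (Python) =====
-- def asignacion_aproximada(costos):
--     n = len(costos)
--     tomada = [False] * n
--     asignacion = []
--     for fila in costos:
--         for j in sorted(range(n), key=lambda t: (fila[t], t)):
--             if not tomada[j]:
--                 tomada[j] = True
--                 asignacion.append(j)
--                 break
--     return asignacion
-- ===== Notes on version B (the rewrite author's own statement) =====
-- stated objective: alternative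
-- what changed: Replaces A's running-minimum scan with availability flags by, per worker, a stable sort of the task indices on the key (cost, index) and taking the first index that is still free.
-- outside the precondition, e.g. on asignacion_aproximada([[5, 1], [7]]): A returns [1, 0], B raises IndexError
import Mathlib
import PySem

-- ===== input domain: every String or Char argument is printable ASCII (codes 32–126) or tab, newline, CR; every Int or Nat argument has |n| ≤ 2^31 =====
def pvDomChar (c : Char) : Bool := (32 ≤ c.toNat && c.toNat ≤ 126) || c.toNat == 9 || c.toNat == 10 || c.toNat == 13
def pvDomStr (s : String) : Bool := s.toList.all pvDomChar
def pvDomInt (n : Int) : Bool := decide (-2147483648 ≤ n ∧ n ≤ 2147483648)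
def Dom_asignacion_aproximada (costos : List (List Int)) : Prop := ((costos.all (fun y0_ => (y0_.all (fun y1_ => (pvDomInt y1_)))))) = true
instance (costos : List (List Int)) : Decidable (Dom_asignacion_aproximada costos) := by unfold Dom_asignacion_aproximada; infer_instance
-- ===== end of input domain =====

-- B replaces A's per-worker running-minimum scan by a stable sort of the task indices on the
-- key (cost, index) followed by taking the first still-free index (objective: alternative).

-- ===== PORT A =====
-- inner loop "for j in range(n): if not tareas_asignadas[j] and costos[i][j] < min_costo: …";
-- min_costo = float('inf') is ported as `none` (any int compares below it).
def pvInnerA (fila : List Int) (asig : List Bool) (n : Nat) : Option Int × Int :=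
  (PySem.List.pyRange 0 (n : Int) 1).foldl
    (fun st j =>
      if (!(PySem.List.pyGetD asig j false)) && (match st.1 with
          | none => true
          | some m => decide (PySem.List.pyGetD fila j 0 < m)) then
        (some (PySem.List.pyGetD fila j 0), j)
      else st)
    (none, -1)

def pvStepA (n : Nat) (st : List Bool × List Int) (fila : List Int) : List Bool × List Int :=
  let te := (pvInnerA fila st.1 n).2
  (PySem.List.pySetD st.1 te true, st.2 ++ [te])

def asignacion_aproximada (costos : List (List Int)) : List Int :=
  ((PySem.List.pyRange 0 (costos.length : Int) 1).foldl
      (fun st i => pvStepA costos.length st (PySem.List.pyGetD costos i []))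
      (List.replicate costos.length false, [])).2

-- ===== PORT B =====
-- "for j in sorted(range(n), key=lambda t: (fila[t], t)): if not tomada[j]: take j; break"
def pvStepB (n : Nat) (st : List Bool × List Int) (fila : List Int) : List Bool × List Int :=
  let orden := PySem.List.sorted2 (PySem.List.pyRange 0 (n : Int) 1)
      (fun t => PySem.List.pyGetD fila t 0) (fun t => t)
  match orden.find? (fun j => !(PySem.List.pyGetD st.1 j false)) with
  | some j => (PySem.List.pySetD st.1 j true, st.2 ++ [j])
  | none => st

def asignacion_aproximada_alt (costos : List (List Int)) : List Int :=
  (costos.foldl (pvStepB costos.length) (List.replicate costos.length false, [])).2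

-- ===== PRECONDITION & SPEC =====
-- Pre_ excludes ragged cost matrices (a row shorter than len(costos)): there Python A raises
-- IndexError, except when short-circuit evaluation happens to skip every missing entry (it then
-- still returns), while B's sort key reads every entry of the row and raises.
def Pre_asignacion_aproximada (costos : List (List Int)) : Prop :=
  ∀ fila ∈ costos, costos.length ≤ fila.length
instance (costos : List (List Int)) : Decidable (Pre_asignacion_aproximada costos) := by
  unfold Pre_asignacion_aproximada; infer_instance
def pvWitness_asignacion_aproximada : List (List Int) := [[1, 2], [3, 4]]

def Spec_asignacion_aproximada (costos : List (List Int)) (out : List Int) : Prop := out = asignacion_aproximada_alt costos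
instance (costos : List (List Int)) (out : List Int) : Decidable (Spec_asignacion_aproximada costos out) := by unfold Spec_asignacion_aproximada; infer_instance

-- ===== CLAIM (what is proved, stated in full; the proofs are below) =====
def Claim_equal_asignacion_aproximada : Prop := ∀ (costos : List (List Int)), Dom_asignacion_aproximada costos → Pre_asignacion_aproximada costos → Spec_asignacion_aproximada costos (asignacion_aproximada costos)

-- ===== LEMMAS AND PROOFS =====

-- the strict lexicographic (cost, index) comparison B's sorted2 sorts by
def pvBefore (fila : List Int) (a b : Int) : Bool :=
  decide (PySem.List.pyGetD fila a 0 < PySem.List.pyGetD fila b 0) ||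
    (!decide (PySem.List.pyGetD fila b 0 < PySem.List.pyGetD fila a 0) && decide (a < b))

lemma pvBefore_asymm (fila : List Int) (a b : Int) (h : pvBefore fila a b = true) :
    pvBefore fila b a = false := by
  simp only [pvBefore, Bool.or_eq_true, Bool.and_eq_true, Bool.not_eq_true',
    decide_eq_true_eq, decide_eq_false_iff_not, Bool.or_eq_false_iff, Bool.and_eq_false_iff,
    Bool.not_eq_false'] at *
  omega

lemma pvBefore_trans_neg (fila : List Int) (a b c : Int)
    (h1 : pvBefore fila a b = true) (h2 : pvBefore fila c b = false) :
    pvBefore fila c a = false := by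
  simp only [pvBefore, Bool.or_eq_true, Bool.and_eq_true, Bool.not_eq_true',
    decide_eq_true_eq, decide_eq_false_iff_not, Bool.or_eq_false_iff, Bool.and_eq_false_iff,
    Bool.not_eq_false'] at *
  omega

lemma pvBefore_total (fila : List Int) (a b : Int)
    (h1 : pvBefore fila a b = false) (h2 : pvBefore fila b a = false) : a = b := by
  simp [pvBefore] at h1 h2
  omega

lemma pvInsertBy_pairwise {α : Type} (before : α → α → Bool)
    (hA : ∀ a b, before a b = true → before b a = false)
    (hT : ∀ a b c, before a b = true → before c b = false → before c a = false)
    (x : α) (acc : List α) (h : acc.Pairwise (fun a b => before b a = false)) :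
    (PySem.List.insertBy before x acc).Pairwise (fun a b => before b a = false) := by
  induction acc with
  | nil => simp [PySem.List.insertBy]
  | cons y ys ih =>
    rw [PySem.List.insertBy.eq_2]
    rcases List.pairwise_cons.mp h with ⟨hy, hys⟩
    by_cases hb : before x y = true
    · simp only [hb, if_true]
      refine List.pairwise_cons.mpr ⟨?_, h⟩
      intro z hz
      rcases List.mem_cons.mp hz with rfl | hz2
      · exact hA _ _ hb
      · exact hT x y z hb (hy z hz2)
    · simp only [hb]
      refine List.pairwise_cons.mpr ⟨?_, ih hys⟩
      intro z hz
      rw [PySem.List.insertBy_mem_iff] at hz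
      rcases hz with rfl | hz
      · exact Bool.eq_false_iff.mpr hb
      · exact hy z hz

lemma pvFoldl_insertBy_pairwise {α : Type} (before : α → α → Bool)
    (hA : ∀ a b, before a b = true → before b a = false)
    (hT : ∀ a b c, before a b = true → before c b = false → before c a = false)
    (l acc : List α) (h : acc.Pairwise (fun a b => before b a = false)) :
    (l.foldl (fun acc x => PySem.List.insertBy before x acc) acc).Pairwise
      (fun a b => before b a = false) := by
  induction l generalizing acc with
  | nil => exact h
  | cons x xs ih => exact ih _ (pvInsertBy_pairwise before hA hT x acc h)

lemma pvOrden_pairwise (fila : List Int) (n : Nat) :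
    (PySem.List.sorted2 (PySem.List.pyRange 0 (n : Int) 1)
        (fun t => PySem.List.pyGetD fila t 0) (fun t => t)).Pairwise
      (fun a b => pvBefore fila b a = false) := by
  have hdef : PySem.List.sorted2 (PySem.List.pyRange 0 (n : Int) 1)
        (fun t => PySem.List.pyGetD fila t 0) (fun t => t) =
      (PySem.List.pyRange 0 (n : Int) 1).foldl
        (fun acc x => PySem.List.insertBy (pvBefore fila) x acc) [] := by
    rfl
  rw [hdef]
  exact pvFoldl_insertBy_pairwise (pvBefore fila) (pvBefore_asymm fila)
    (pvBefore_trans_neg fila) _ [] (List.Pairwise.nil)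

lemma pvFind?_spec {α : Type} (R : α → α → Prop) (p : α → Bool) (l : List α)
    (h : l.Pairwise R) {x : α} (hx : l.find? p = some x) :
    ∀ y ∈ l, p y = true → y = x ∨ R x y := by
  induction l with
  | nil => simp at hx
  | cons z zs ih =>
    rcases List.pairwise_cons.mp h with ⟨hz, hzs⟩
    by_cases hp : p z = true
    · rw [List.find?_cons_of_pos hp] at hx
      obtain rfl := Option.some_injective _ hx
      intro y hy _
      rcases List.mem_cons.mp hy with rfl | hy2
      · exact Or.inl rfl
      · exact Or.inr (hz y hy2)
    · rw [List.find?_cons_of_neg (by simpa using hp)] at hx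
      intro y hy hpy
      rcases List.mem_cons.mp hy with rfl | hy2
      · exact absurd hpy hp
      · exact ih hzs hx y hy2 hpy

lemma pvInnerA_succ (fila : List Int) (asig : List Bool) (n : Nat) :
    pvInnerA fila asig (n + 1) =
      (fun st (j : Int) =>
        if (!(PySem.List.pyGetD asig j false)) && (match st.1 with
            | none => true
            | some m => decide (PySem.List.pyGetD fila j 0 < m)) then
          (some (PySem.List.pyGetD fila j 0), j)
        else st) (pvInnerA fila asig n) (n : Int) := by
  unfold pvInnerA
  rw [show ((n + 1 : Nat) : Int) = (n : Int) + 1 by push_cast; ring,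
    PySem.List.pyRange_one_succ_right (by positivity), List.foldl_append]
  simp

lemma pvInnerA_spec (fila : List Int) (asig : List Bool) (n : Nat) :
    (pvInnerA fila asig n = (none, -1) ∧
      ∀ j : Int, 0 ≤ j → j < (n : Int) → PySem.List.pyGetD asig j false = true)
    ∨ (∃ m : Int, pvInnerA fila asig n = (some (PySem.List.pyGetD fila m 0), m) ∧
        0 ≤ m ∧ m < (n : Int) ∧ PySem.List.pyGetD asig m false = false ∧
        ∀ j : Int, 0 ≤ j → j < (n : Int) → PySem.List.pyGetD asig j false = false →
          pvBefore fila j m = false) := by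
  induction n with
  | zero =>
    left
    constructor
    · simp [pvInnerA, PySem.List.pyRange_one_eq_nil]
    · intro j h1 h2; omega
  | succ c ih =>
    rw [pvInnerA_succ]
    rcases ih with ⟨heq, hall⟩ | ⟨m, heq, hm0, hmn, hmf, hmin⟩
    · rw [heq]
      by_cases hf : PySem.List.pyGetD asig (c : Int) false = false
      · right
        refine ⟨(c : Int), ?_, by positivity, by push_cast; omega, hf, ?_⟩
        · simp only [hf, Bool.not_false, Bool.and_true, if_true]
        · intro j h0 hj hjf
          rcases lt_or_eq_of_le (show j ≤ (c:Int) by push_cast at hj ⊢; omega) with h | h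
          · exact absurd hjf (by simp [hall j h0 h])
          · subst h
            simp only [pvBefore, Bool.or_eq_false_iff, Bool.and_eq_false_iff,
              Bool.not_eq_false', decide_eq_false_iff_not, decide_eq_true_eq]
            omega
      · left
        rw [Bool.not_eq_false] at hf
        constructor
        · simp only [hf, Bool.not_true, Bool.false_and]
          simp
        · intro j h0 hj
          rcases lt_or_eq_of_le (show j ≤ (c:Int) by push_cast at hj ⊢; omega) with h | h
          · exact hall j h0 h
          · rw [h]; exact hf
    · rw [heq]
      by_cases hf : PySem.List.pyGetD asig (c : Int) false = false
      · by_cases hlt : PySem.List.pyGetD fila (c:Int) 0 < PySem.List.pyGetD fila m 0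
        · right
          refine ⟨(c : Int), ?_, by positivity, by push_cast; omega, hf, ?_⟩
          · simp only [hf, Bool.not_false, Bool.true_and, decide_eq_true hlt, if_true]
          · intro j h0 hj hjf
            rcases lt_or_eq_of_le (show j ≤ (c:Int) by push_cast at hj ⊢; omega) with h | h
            · have hjm := hmin j h0 h hjf
              simp only [pvBefore, Bool.or_eq_false_iff, Bool.and_eq_false_iff,
                Bool.not_eq_false', decide_eq_false_iff_not, decide_eq_true_eq] at hjm ⊢
              omega
            · subst h
              simp only [pvBefore, Bool.or_eq_false_iff, Bool.and_eq_false_iff,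
                Bool.not_eq_false', decide_eq_false_iff_not, decide_eq_true_eq]
              omega
        · right
          refine ⟨m, ?_, hm0, by push_cast at hmn ⊢; omega, hmf, ?_⟩
          · simp only [hf, Bool.not_false, Bool.true_and, decide_eq_false hlt]
            simp
          · intro j h0 hj hjf
            rcases lt_or_eq_of_le (show j ≤ (c:Int) by push_cast at hj ⊢; omega) with h | h
            · exact hmin j h0 h hjf
            · subst h
              simp only [pvBefore, Bool.or_eq_false_iff, Bool.and_eq_false_iff,
                Bool.not_eq_false', decide_eq_false_iff_not, decide_eq_true_eq]
              omega
      · right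
        rw [Bool.not_eq_false] at hf
        refine ⟨m, ?_, hm0, by push_cast at hmn ⊢; omega, hmf, ?_⟩
        · simp only [hf, Bool.not_true, Bool.false_and]
          simp
        · intro j h0 hj hjf
          rcases lt_or_eq_of_le (show j ≤ (c:Int) by push_cast at hj ⊢; omega) with h | h
          · exact hmin j h0 h hjf
          · subst h; rw [hf] at hjf; exact absurd hjf (by simp)

lemma pvCount_set (l : List Bool) (k : Nat) (hk : k < l.length) (hf : l[k] = false) :
    (l.set k true).count false + 1 = l.count false := by
  induction l generalizing k with
  | nil => simp at hk
  | cons x xs ih =>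
    cases k with
    | zero => simp_all
    | succ k' =>
      simp only [List.set_cons_succ, List.count_cons]
      have := ih k' (by simpa using hk) (by simpa using hf)
      omega

lemma pvStep_spec (n : Nat) (fila : List Int) (asig : List Bool) (res : List Int)
    (hlen : asig.length = n) (hcnt : 0 < asig.count false) :
    ∃ m : Int, 0 ≤ m ∧ m < (n : Int) ∧
      PySem.List.pyGetD asig m false = false ∧
      pvStepA n (asig, res) fila = (PySem.List.pySetD asig m true, res ++ [m]) ∧
      pvStepB n (asig, res) fila = (PySem.List.pySetD asig m true, res ++ [m]) := by
  -- a free slot exists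
  obtain ⟨k, hk, hkf⟩ := List.getElem_of_mem (List.count_pos_iff.mp hcnt)
  have hkfree : PySem.List.pyGetD asig (k : Int) false = false := by
    simp [PySem.List.pyGetD_natCast, hk, hkf]
  rcases pvInnerA_spec fila asig n with ⟨heq, hall⟩ | ⟨m, heq, hm0, hmn, hmf, hmin⟩
  · exact absurd (hall k (by positivity) (by rw [hlen] at hk; exact_mod_cast hk)) (by simp [hkfree])
  · refine ⟨m, hm0, hmn, hmf, ?_, ?_⟩
    · simp [pvStepA, heq]
    · unfold pvStepB
      have hperm := PySem.List.sorted2_perm (PySem.List.pyRange 0 (n : Int) 1)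
        (fun t => PySem.List.pyGetD fila t 0) (fun t => t) false
      set orden := PySem.List.sorted2 (PySem.List.pyRange 0 (n : Int) 1)
        (fun t => PySem.List.pyGetD fila t 0) (fun t => t) with horden
      have hmem : m ∈ orden := by
        rw [hperm.mem_iff, PySem.List.mem_pyRange_one]
        exact ⟨hm0, hmn⟩
      have hfind : ∃ x, orden.find? (fun j => !(PySem.List.pyGetD asig j false)) = some x := by
        rcases h : orden.find? (fun j => !(PySem.List.pyGetD asig j false)) with _ | x
        · have := List.find?_eq_none.mp h m hmem
          simp [hmf] at this
        · exact ⟨x, rfl⟩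
      obtain ⟨x, hx⟩ := hfind
      have hxp : PySem.List.pyGetD asig x false = false := by
        have := List.find?_some hx
        simpa using this
      have hxmem : x ∈ orden := List.mem_of_find?_eq_some hx
      have hxrange : 0 ≤ x ∧ x < (n : Int) := by
        rw [hperm.mem_iff, PySem.List.mem_pyRange_one] at hxmem
        exact hxmem
      have hxm : x = m := by
        have h1 : pvBefore fila x m = false := hmin x hxrange.1 hxrange.2 hxp
        rcases pvFind?_spec _ _ orden (pvOrden_pairwise fila n) hx m hmem (by simp [hmf]) with h | h2
        · exact h.symm
        · exact pvBefore_total fila x m h1 h2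
      simp only [hx, hxm]

lemma pvOuter (n : Nat) (rows : List (List Int)) (asig : List Bool) (res : List Int)
    (hlen : asig.length = n) (hcnt : rows.length ≤ asig.count false) :
    rows.foldl (pvStepA n) (asig, res) = rows.foldl (pvStepB n) (asig, res) := by
  induction rows generalizing asig res with
  | nil => rfl
  | cons fila rows ih =>
    have hpos : 0 < asig.count false := by simp only [List.length_cons] at hcnt; omega
    obtain ⟨m, hm0, hmn, hmf, hA, hB⟩ := pvStep_spec n fila asig res hlen hpos
    have hk : m.toNat < asig.length := by omega
    have hset : PySem.List.pySetD asig m true = asig.set m.toNat true :=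
      PySem.List.pySetD_of_nonneg asig true hm0
    have hkf : asig[m.toNat] = false := by
      have h2 := hmf
      rw [show m = ((m.toNat : Nat) : Int) from (Int.toNat_of_nonneg hm0).symm,
        PySem.List.pyGetD_natCast] at h2
      simpa [List.getD_eq_getElem?_getD, List.getElem?_eq_getElem hk] using h2
    have hcount := pvCount_set asig m.toNat hk hkf
    simp only [List.foldl_cons, hA, hB]
    apply ih
    · rw [hset]; simpa using hlen
    · rw [hset]; simp only [List.length_cons] at hcnt; omega

-- ===== VERDICT (by name: the statement is the Claim_ definition above) =====
theorem asignacion_aproximada_spec : Claim_equal_asignacion_aproximada := by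
  intro costos _ _
  unfold Spec_asignacion_aproximada asignacion_aproximada asignacion_aproximada_alt
  rw [PySem.List.foldl_pyRange_zero_pyGetD' costos [] (fun st fila => pvStepA costos.length st fila) (List.replicate costos.length false, [])]
  rw [pvOuter costos.length costos (List.replicate costos.length false) [] (by simp) (by simp)]
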